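-- pv_equiv track=rewrite | github.com/mpotoczny/python_zadania | powtorka_sierpien/010-kata-nacisniecia.py | num_key_strokes
-- ===== SOURCE A (Python) =====
-- def num_key_strokes(text):
--
--     # # SPOSÓB NR 1
--     # presses_sum = 0
--     # for character in text:
--     #     # lower case
--     #     if 97 <= ord(character) < 123:
--     #         presses_sum += 1
--     #     # numbers
--     #     elif 48 <= ord(character) < 58:
--     #         presses_sum += 1
--     #     # one-pressed characters: ` -=[];'\,./
--     #     elif character in " `-=[];'\,./":
--     #         presses_sum += 1
--     #     # tab and enter
--     #     elif ord(character) == 9 or ord(character) == 11: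
--     #         presses_sum += 1
--     #
--     #     # upper case
--     #     elif 65 <= ord(character) < 91:
--     #         presses_sum += 2
--     #     # characters with SHIFT
--     #     elif character in '"~!@#$%^&*()_+{}:|<>?':
--     #         presses_sum += 2
--     #
--     # return presses_sum
--
--     # # SPOSÓB NR 2
--     # return sum([1 if i in "abcdefghijklmnopqrestuvwxyz1234567890-=`];[',.\/ " else 2 for i in text])
--
--     # SPOSÓB NR 3
--     symbol = '~!@#$%^&*()_+{}:"|<>?' # znaki z shiftem
--     count = 0
--     for letter in text:
--         if letter.isupper() or letter in symbol:
--             count += 1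
--         count += 1
--     return count
-- ===== SOURCE B (Python) =====
-- def num_key_strokes(text):
--     symbol = '~!@#$%^&*()_+{}:"|<>?'  # znaki z shiftem
--     freq = {}
--     for c in text:
--         freq[c] = freq.get(c, 0) + 1
--     return sum(n * (2 if c.isupper() or c in symbol else 1) for c, n in freq.items())
-- ===== Notes on version B (the rewrite author's own statement) =====
-- stated objective: alternative
-- what changed: B builds a character-frequency histogram (dict) in one pass and returns the weighted sum n*cost over distinct characters, evaluating the isupper/symbol test once per distinct character instead of once per occurrence in a running accumulator.
import Mathlib
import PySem

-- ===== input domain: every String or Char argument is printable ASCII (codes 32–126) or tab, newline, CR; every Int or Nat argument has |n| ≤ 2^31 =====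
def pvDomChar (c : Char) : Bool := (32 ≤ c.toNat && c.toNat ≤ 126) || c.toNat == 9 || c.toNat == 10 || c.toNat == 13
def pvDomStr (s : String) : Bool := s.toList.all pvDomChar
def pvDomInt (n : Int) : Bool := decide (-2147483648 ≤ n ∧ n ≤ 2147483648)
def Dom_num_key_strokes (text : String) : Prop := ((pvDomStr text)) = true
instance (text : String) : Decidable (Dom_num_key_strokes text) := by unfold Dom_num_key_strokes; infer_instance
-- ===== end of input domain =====

-- B builds a frequency histogram and sums n*cost over distinct characters; same value as A's per-character accumulator (objective: alternative).

-- ===== PORT A =====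
-- literal port of A: loop with a running count, conditional +1 then unconditional +1
def pvSymbol : List Char := "~!@#$%^&*()_+{}:\"|<>?".toList

def num_key_strokes (text : String) : Int :=
  text.toList.foldl
    (fun count letter =>
      (if PySem.Chars.isupper letter || letter ∈ pvSymbol then count + 1 else count) + 1)
    0

-- ===== PORT B =====
-- port of B: build freq = {c: occurrences} by one pass, then sum n * (2 if shifted else 1) over its items
def num_key_strokes_alt (text : String) : Int :=
  let freq : PySem.Dict Char Int :=
    text.toList.foldl (fun d c => d.insert c (d.getD c 0 + 1)) PySem.Dict.empty
  (freq.items.map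
    (fun p => p.2 * (if PySem.Chars.isupper p.1 || p.1 ∈ pvSymbol then (2 : Int) else 1))).sum

-- ===== PRECONDITION & SPEC =====
def Spec_num_key_strokes (text : String) (out : Int) : Prop := out = num_key_strokes_alt text
instance (text : String) (out : Int) : Decidable (Spec_num_key_strokes text out) := by unfold Spec_num_key_strokes; infer_instance

-- ===== CLAIM (what is proved, stated in full; the proofs are below) =====
def Claim_equal_num_key_strokes : Prop := ∀ (text : String), Dom_num_key_strokes text → Spec_num_key_strokes text (num_key_strokes text)

-- ===== LEMMAS AND PROOFS =====

-- A's loop is length + number of shifted characters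
theorem pv_loop_eq (l : List Char) (acc : Int) :
    l.foldl
      (fun count letter =>
        (if PySem.Chars.isupper letter || letter ∈ pvSymbol then count + 1 else count) + 1)
      acc
      = acc + (l.length : Int) + (l.countP (fun c => PySem.Chars.isupper c || c ∈ pvSymbol) : Int) := by
  induction l generalizing acc with
  | nil => simp
  | cons c t ih =>
    simp only [List.foldl_cons, ih, List.length_cons, List.countP_cons]
    split_ifs with h <;> simp <;> ring

-- splitting a sum over l at the occurrences of one character k
theorem pv_sum_split (f : Char → Int) (k : Char) (l : List Char) :
    (l.map f).sum = (l.count k : Int) * f k + ((l.filter (fun c => c ≠ k)).map f).sum := by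
  induction l with
  | nil => simp
  | cons c t ih =>
    by_cases h : c = k
    · subst h
      simp [ih]
      ring
    · simp [h, ih]
      ring

-- weighted sum over a duplicate-free superset of l's characters = plain sum over l
theorem pv_sum_distinct (f : Char → Int) :
    ∀ (s l : List Char), s.Nodup → (∀ c ∈ l, c ∈ s) →
      (s.map (fun k => (l.count k : Int) * f k)).sum = (l.map f).sum := by
  intro s
  induction s with
  | nil =>
    intro l _ hsub
    have : l = [] := List.eq_nil_iff_forall_not_mem.mpr (fun c hc => List.not_mem_nil (hsub c hc))
    simp [this]
  | cons k s' ih =>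
    intro l hnd hsub
    have hk : k ∉ s' := (List.nodup_cons.mp hnd).1
    have hnd' : s'.Nodup := (List.nodup_cons.mp hnd).2
    have hsub' : ∀ c ∈ l.filter (fun c => c ≠ k), c ∈ s' := by
      intro c hc
      have hcl := List.mem_of_mem_filter hc
      have hne : c ≠ k := by
        have := List.of_mem_filter hc
        simpa using this
      rcases List.mem_cons.mp (hsub c hcl) with h | h
      · exact absurd h hne
      · exact h
    have hcount : ∀ k' ∈ s', (l.count k' : Int) = ((l.filter (fun c => c ≠ k)).count k' : Int) := by
      intro k' hk'
      have hne : k' ≠ k := fun h => hk (h ▸ hk')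
      congr 1
      rw [List.count_filter]
      simp [hne]
    calc (List.map (fun k => (l.count k : Int) * f k) (k :: s')).sum
        = (l.count k : Int) * f k + (s'.map (fun k => (l.count k : Int) * f k)).sum := by
          simp
      _ = (l.count k : Int) * f k
            + (s'.map (fun k' => ((l.filter (fun c => c ≠ k)).count k' : Int) * f k')).sum := by
          congr 1
          apply congrArg
          exact List.map_congr_left (fun k' hk' => by rw [hcount k' hk'])
      _ = (l.count k : Int) * f k + ((l.filter (fun c => c ≠ k)).map f).sum := by
          rw [ih _ hnd' hsub']
      _ = (l.map f).sum := (pv_sum_split f k l).symm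

-- a sum of 1-or-2 costs is length + count of the 2-cost characters
theorem pv_sum_cost (p : Char → Bool) (l : List Char) :
    (l.map (fun c => if p c then (2 : Int) else 1)).sum
      = (l.length : Int) + (l.countP p : Int) := by
  induction l with
  | nil => simp
  | cons c t ih =>
    simp only [List.map_cons, List.sum_cons, ih, List.length_cons, List.countP_cons]
    split_ifs with h <;> simp <;> ring

-- ===== VERDICT (by name: the statement is the Claim_ definition above) =====
theorem num_key_strokes_spec : Claim_equal_num_key_strokes := by
  intro text _
  unfold Spec_num_key_strokes num_key_strokes num_key_strokes_alt
  rw [pv_loop_eq]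
  simp only [PySem.Dict.foldl_insert_getD_add_one_eq_counter, PySem.Dict.items_counter,
    List.map_map]
  have := pv_sum_distinct
    (fun c => if PySem.Chars.isupper c || c ∈ pvSymbol then (2 : Int) else 1)
    (PySem.Set.ofList text.toList) text.toList
    (PySem.Set.nodup_ofList text.toList)
    (fun c hc => (PySem.Set.mem_ofList _ _).mpr hc)
  simp only [Function.comp_def] at this ⊢
  rw [this, pv_sum_cost]
  ring
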